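-- pv_equiv track=rewrite | github.com/Robgea/Advent-of-Code | Day 9/first.py | sum_dict_builder
-- ===== SOURCE A (Python) =====
-- def sum_dict_builder(numbs_list):
--     run_count = 0
--     output_dict = {}
--
--     for num in numbs_list:
--         if run_count > 24:
--             first_ind = run_count - 25
--             check_set = numb_summer(numbs_list[first_ind:run_count])
--             output_dict.update({str(num) : check_set})
--         else:
--             holding_set = set([num + 1, num + 2, num])
--             output_dict.update({str(num) : holding_set})
--
--         run_count += 1
--
--     return output_dict
--
-- def numb_summer(input_list):
--     run_count = 0
--     return_set = set()
--     for num in input_list: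
--         if run_count == len(input_list) - 1:
--             return return_set
--         else:
--             add_list = input_list[run_count + 1:]
--             for add in add_list:
--                 return_set.add(num + add)
--
--         run_count += 1
-- ===== SOURCE B (Python) =====
-- # Different algorithm: instead of recomputing all C(25,2) pairwise sums of the
-- # window at every step, B incrementally maintains `rows`, where rows[j] holds the
-- # sums window[j]+window[l] for l > j; each step only appends one new sum per
-- # surviving row and the emitted set is just the flattening of rows.
-- def sum_dict_builder(numbs_list):
--     output = {}
--     window = []
--     rows = []  # rows[j] == [window[j] + window[l] for l in range(j + 1, len(window))]
--     for num in numbs_list: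
--         if len(window) == 25:
--             output[str(num)] = set(s for row in rows for s in row)
--             rows = [r + [w + num] for r, w in zip(rows[1:], window[1:])] + [[]]
--             window = window[1:] + [num]
--         else:
--             output[str(num)] = {num + 1, num + 2, num}
--             rows = [r + [w + num] for r, w in zip(rows, window)] + [[]]
--             window = window + [num]
--     return output
-- ===== Notes on version B (the rewrite author's own statement) =====
-- stated objective: alternative
-- what changed: B replaces A's per-step recomputation of all C(25,2) pairwise window sums (re-slicing the input and running a nested double loop in a helper) by an incrementally maintained list of per-first-element sum rows: each step appends a single new sum to each surviving row and emits the flattened rows as the set.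
import Mathlib
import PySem

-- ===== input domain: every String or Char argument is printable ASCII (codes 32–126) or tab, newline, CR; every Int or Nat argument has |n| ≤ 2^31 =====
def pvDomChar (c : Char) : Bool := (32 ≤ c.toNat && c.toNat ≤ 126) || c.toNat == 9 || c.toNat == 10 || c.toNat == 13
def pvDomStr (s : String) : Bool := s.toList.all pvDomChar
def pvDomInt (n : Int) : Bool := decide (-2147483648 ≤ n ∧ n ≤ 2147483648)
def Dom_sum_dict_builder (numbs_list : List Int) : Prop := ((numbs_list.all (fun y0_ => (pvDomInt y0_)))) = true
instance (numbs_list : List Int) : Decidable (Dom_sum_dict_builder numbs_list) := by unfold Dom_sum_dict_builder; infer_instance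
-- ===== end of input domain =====

-- B drops A's per-step nested pairwise-sum recomputation over a re-sliced window
-- and instead maintains the per-first-element rows of sums incrementally, appending
-- one sum per surviving row each step; objective: alternative, same cost class.

-- ===== PORT A =====
-- numb_summer's loop, with the early return at run_count == len(input_list) - 1;
-- the [] case (Python falls off the loop and returns None) is unreachable from
-- sum_dict_builder, which only ever passes nonempty slices.
def numbSummerGo (input_list : List Int) (run_count : Nat) (return_set : PySem.Set Int) :
    List Int → PySem.Set Int
  | [] => return_set
  | num :: rest =>
    if run_count = input_list.length - 1 then return_set
    else
      let add_list := PySem.List.slice input_list (some ((run_count : Int) + 1)) none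
      numbSummerGo input_list (run_count + 1)
        (add_list.foldl (fun s a => PySem.Set.add s (num + a)) return_set) rest

def numb_summer (input_list : List Int) : PySem.Set Int :=
  numbSummerGo input_list 0 PySem.Set.empty input_list

def sum_dict_builder (numbs_list : List Int) : List (String × List Int) :=
  (numbs_list.foldl
    (fun (st : Int × PySem.Dict String (List Int)) num =>
      if st.1 > 24 then
        (st.1 + 1, st.2.insert (PySem.Int.toStr num)
          (numb_summer (PySem.List.slice numbs_list (some (st.1 - 25)) (some st.1))))
      else
        (st.1 + 1, st.2.insert (PySem.Int.toStr num)
          (PySem.Set.ofList [num + 1, num + 2, num])))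
    ((0 : Int), PySem.Dict.empty)).2.items

-- ===== PORT B =====
-- state: (window, rows, dict); rows[j] = [window[j] + window[l] for l > j]
def sum_dict_builder_alt (numbs_list : List Int) : List (String × List Int) :=
  (numbs_list.foldl
    (fun (st : List Int × List (List Int) × PySem.Dict String (List Int)) num =>
      let window := st.1
      let rows := st.2.1
      if window.length = 25 then
        (PySem.List.slice window (some 1) none ++ [num],
         ((PySem.List.slice rows (some 1) none).zip
            (PySem.List.slice window (some 1) none)).map (fun p => p.1 ++ [p.2 + num]) ++ [[]],
         st.2.2.insert (PySem.Int.toStr num) (PySem.Set.ofList rows.flatten))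
      else
        (window ++ [num],
         (rows.zip window).map (fun p => p.1 ++ [p.2 + num]) ++ [[]],
         st.2.2.insert (PySem.Int.toStr num) (PySem.Set.ofList [num + 1, num + 2, num])))
    (([], [], PySem.Dict.empty))).2.2.items

-- ===== PRECONDITION & SPEC =====
def Spec_sum_dict_builder (numbs_list : List Int) (out : List (String × List Int)) : Prop := out = sum_dict_builder_alt numbs_list
instance (numbs_list : List Int) (out : List (String × List Int)) : Decidable (Spec_sum_dict_builder numbs_list out) := by unfold Spec_sum_dict_builder; infer_instance

-- ===== CLAIM (what is proved, stated in full; the proofs are below) =====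
def Claim_equal_sum_dict_builder : Prop := ∀ (numbs_list : List Int), Dom_sum_dict_builder numbs_list → Spec_sum_dict_builder numbs_list (sum_dict_builder numbs_list)

-- ===== LEMMAS AND PROOFS =====

-- the row structure B maintains, as a function of the window it describes
def rowsOf : List Int → List (List Int)
  | [] => []
  | x :: xs => (xs.map (fun y => x + y)) :: rowsOf xs

theorem rowsOf_append (num : Int) (w : List Int) :
    rowsOf (w ++ [num]) = ((rowsOf w).zip w).map (fun p => p.1 ++ [p.2 + num]) ++ [[]] := by
  induction w with
  | nil => simp [rowsOf]
  | cons x xs ih => simp [rowsOf, ih]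

-- numb_summer's indexed loop builds, in the same insertion order, the set of the
-- flattened rows of its argument (generalized over the loop counter).
theorem numbSummerGo_eq_aux (w : List Int) : ∀ (n rc : Nat) (s : PySem.Set Int),
    w.length - rc = n →
    numbSummerGo w rc s (w.drop rc) =
      ((rowsOf (w.drop rc)).flatten).foldl PySem.Set.add s := by
  intro n
  induction n with
  | zero =>
    intro rc s hn
    have hnil : w.drop rc = [] := List.drop_eq_nil_iff.mpr (by omega)
    simp [hnil, numbSummerGo, rowsOf]
  | succ m ih =>
    intro rc s hn
    obtain ⟨num, rest, hdrop⟩ : ∃ num rest, w.drop rc = num :: rest := by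
      cases hcd : w.drop rc with
      | nil =>
        have := congrArg List.length hcd
        simp at this; omega
      | cons a b => exact ⟨a, b, rfl⟩
    have hrest : w.drop (rc + 1) = rest := by
      rw [← List.tail_drop, hdrop]; rfl
    have hslice : PySem.List.slice w (some ((rc : Int) + 1)) none = rest := by
      have h1 : ((rc : Int) + 1) = ((rc + 1 : Nat) : Int) := by omega
      rw [h1, PySem.List.slice_from_natCast, hrest]
    rw [hdrop]
    by_cases hend : rc = w.length - 1
    · have hlenr : rest.length = 0 := by
        have := congrArg List.length hdrop
        simp at this; omega
      have hrestnil : rest = [] := List.eq_nil_of_length_eq_zero hlenr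
      simp [numbSummerGo, if_pos hend, hrestnil, rowsOf]
    · simp only [numbSummerGo, if_neg hend]
      have hih := ih (rc + 1)
        ((PySem.List.slice w (some ((rc : Int) + 1)) none).foldl
          (fun s a => PySem.Set.add s (num + a)) s) (by omega)
      rw [hrest] at hih
      rw [hih, hslice]
      simp [rowsOf, List.foldl_map]

theorem numb_summer_eq (w : List Int) :
    numb_summer w = PySem.Set.ofList (rowsOf w).flatten := by
  have h := numbSummerGo_eq_aux w w.length 0 PySem.Set.empty (by omega)
  simpa [numb_summer, PySem.Set.ofList_eq_foldl] using h

-- the main fold invariant: A's counter k and B's state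
-- (window, rows) = (w_k, rowsOf w_k) with w_k = (numbs.take k).drop (k - 25)
-- drive the two folds to the same dict.
theorem main_inv (numbs : List Int) : ∀ (n k : Nat) (d : PySem.Dict String (List Int)),
    numbs.length - k = n → k ≤ numbs.length →
    ((numbs.drop k).foldl
      (fun (st : Int × PySem.Dict String (List Int)) num =>
        if st.1 > 24 then
          (st.1 + 1, st.2.insert (PySem.Int.toStr num)
            (numb_summer (PySem.List.slice numbs (some (st.1 - 25)) (some st.1))))
        else
          (st.1 + 1, st.2.insert (PySem.Int.toStr num)
            (PySem.Set.ofList [num + 1, num + 2, num])))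
      ((k : Int), d)).2 =
    ((numbs.drop k).foldl
      (fun (st : List Int × List (List Int) × PySem.Dict String (List Int)) num =>
        let window := st.1
        let rows := st.2.1
        if window.length = 25 then
          (PySem.List.slice window (some 1) none ++ [num],
           ((PySem.List.slice rows (some 1) none).zip
              (PySem.List.slice window (some 1) none)).map (fun p => p.1 ++ [p.2 + num]) ++ [[]],
           st.2.2.insert (PySem.Int.toStr num) (PySem.Set.ofList rows.flatten))
        else
          (window ++ [num],
           (rows.zip window).map (fun p => p.1 ++ [p.2 + num]) ++ [[]],
           st.2.2.insert (PySem.Int.toStr num) (PySem.Set.ofList [num + 1, num + 2, num])))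
      ((numbs.take k).drop (k - 25), rowsOf ((numbs.take k).drop (k - 25)), d)).2.2 := by
  intro n
  induction n with
  | zero =>
    intro k d hn hk
    have hnil : numbs.drop k = [] := List.drop_eq_nil_iff.mpr (by omega)
    simp [hnil]
  | succ m ih =>
    intro k d hn hk
    obtain ⟨num, rest, hdrop⟩ : ∃ num rest, numbs.drop k = num :: rest := by
      cases hcd : numbs.drop k with
      | nil =>
        have := congrArg List.length hcd
        simp at this; omega
      | cons a b => exact ⟨a, b, rfl⟩
    have hrest : numbs.drop (k + 1) = rest := by
      rw [← List.tail_drop, hdrop]; rfl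
    have hnumq : numbs[k]? = some num := by
      have h0 : (numbs.drop k)[0]? = some num := by rw [hdrop]; rfl
      simpa [List.getElem?_drop] using h0
    have htake : numbs.take (k + 1) = numbs.take k ++ [num] := by
      rw [List.take_add_one, hnumq]; rfl
    have hcast : ((k : Int) + 1) = ((k + 1 : Nat) : Int) := by omega
    rw [hdrop, List.foldl_cons, List.foldl_cons]
    by_cases hbig : 25 ≤ k
    · -- both take the sliding-window branch
      have hA : ((k : Int) > 24) := by omega
      have hB : ((numbs.take k).drop (k - 25)).length = 25 := by
        simp [List.length_take, List.length_drop]; omega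
      rw [if_pos hA]
      simp only [if_pos hB]
      have hsl : PySem.List.slice numbs (some ((k : Int) - 25)) (some (k : Int))
          = (numbs.take k).drop (k - 25) := by
        have h1 : ((k : Int) - 25) = ((k - 25 : Nat) : Int) := by omega
        rw [h1, PySem.List.slice_natCast, List.drop_take]
      -- the two emitted sets agree
      have hset : numb_summer (PySem.List.slice numbs (some ((k : Int) - 25)) (some (k : Int)))
          = PySem.Set.ofList (rowsOf ((numbs.take k).drop (k - 25))).flatten := by
        rw [hsl, numb_summer_eq]
      -- B's next window is w_{k+1}
      have hwin : PySem.List.slice ((numbs.take k).drop (k - 25)) (some 1) none ++ [num]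
          = (numbs.take (k + 1)).drop (k + 1 - 25) := by
        rw [PySem.List.slice_from_one, List.tail_drop, htake,
          List.drop_append_of_le_length (by simp [List.length_take]; omega)]
        have h2 : k - 25 + 1 = k + 1 - 25 := by omega
        rw [h2]
      -- B's next rows are rowsOf w_{k+1}
      have hwtail : PySem.List.slice ((numbs.take k).drop (k - 25)) (some 1) none
          = ((numbs.take k).drop (k - 25)).tail := PySem.List.slice_from_one _
      have hrtail : PySem.List.slice (rowsOf ((numbs.take k).drop (k - 25))) (some 1) none
          = rowsOf (((numbs.take k).drop (k - 25)).tail) := by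
        rw [PySem.List.slice_from_one]
        cases hc : (numbs.take k).drop (k - 25) with
        | nil => simp [hc] at hB
        | cons a b => simp [rowsOf]
      have hrows : ((PySem.List.slice (rowsOf ((numbs.take k).drop (k - 25))) (some 1) none).zip
              (PySem.List.slice ((numbs.take k).drop (k - 25)) (some 1) none)).map
              (fun p => p.1 ++ [p.2 + num]) ++ [[]]
          = rowsOf ((numbs.take (k + 1)).drop (k + 1 - 25)) := by
        rw [hrtail, hwtail, ← rowsOf_append, ← hwtail, hwin]
      have hih := ih (k + 1) (d.insert (PySem.Int.toStr num)
          (PySem.Set.ofList (rowsOf ((numbs.take k).drop (k - 25))).flatten)) (by omega) (by omega)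
      rw [hrest] at hih
      rw [hset, hwin, hrows, hcast]
      exact hih
    · -- both take the first-25 branch
      have hA : ¬ ((k : Int) > 24) := by omega
      have hB : ¬ (((numbs.take k).drop (k - 25)).length = 25) := by
        simp [List.length_take, List.length_drop]; omega
      rw [if_neg hA]
      simp only [if_neg hB]
      have h0 : k - 25 = 0 := by omega
      have h1 : k + 1 - 25 = 0 := by omega
      have hwin : (numbs.take k).drop (k - 25) ++ [num]
          = (numbs.take (k + 1)).drop (k + 1 - 25) := by
        rw [h0, h1, List.drop_zero, List.drop_zero, htake]
      have hrows : ((rowsOf ((numbs.take k).drop (k - 25))).zip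
              ((numbs.take k).drop (k - 25))).map (fun p => p.1 ++ [p.2 + num]) ++ [[]]
          = rowsOf ((numbs.take (k + 1)).drop (k + 1 - 25)) := by
        rw [← rowsOf_append, hwin]
      have hih := ih (k + 1) (d.insert (PySem.Int.toStr num)
          (PySem.Set.ofList [num + 1, num + 2, num])) (by omega) (by omega)
      rw [hrest] at hih
      rw [hwin, hrows, hcast]
      exact hih

-- ===== VERDICT (by name: the statement is the Claim_ definition above) =====
theorem sum_dict_builder_spec : Claim_equal_sum_dict_builder := by
  intro numbs _
  unfold Spec_sum_dict_builder sum_dict_builder sum_dict_builder_alt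
  have h := main_inv numbs numbs.length 0 PySem.Dict.empty rfl (Nat.zero_le _)
  simpa [rowsOf] using congrArg PySem.Dict.items h
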